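-- pv_equiv track=rewrite | github.com/lenarother/advent-of-code | adventofcode_2023/day_03/solution.py | get_neighbour_positions
-- ===== SOURCE A (Python) =====
-- NEIGHBOUR_POINTS = [
--     (-1, -1), (0, -1), (1, -1),
--     (-1, 0),           (1, 0),
--     (-1, 1),  (0, 1),  (1, 1),
-- ]
--
-- def get_neighbour_positions(n: str, data: str, ln: int, x: int, y: int) -> set[int]:
--     """
--     n -> number as string
--     data -> input string without line breaks
--     x, y -> number coordinates
--     ln -> line length
--     """
--     neighbour_positions = []
--     number_positions = [(x + i, y) for i in range(0, len(n))]
--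
--     for i in range(0, len(n)):
--         for xi, yi in NEIGHBOUR_POINTS:
--             new_x = x + xi + i
--             new_y = y + yi
--
--             if (
--                 0 <= new_x < ln and
--                 0 <= new_y < len(data) // ln and
--                 (new_x, new_y) not in number_positions
--             ):
--                 neighbour_positions.append((new_y * ln) + new_x)
--
--     return set(neighbour_positions)
-- ===== SOURCE B (Python) =====
-- def get_neighbour_positions(n: str, data: str, ln: int, x: int, y: int) -> set[int]:
--     """Frame scan: 3x3 block around the first digit, then the three right-edge
--     cells of each further digit; arithmetic interval test replaces the
--     number-position list and the per-digit 8-offset expansion."""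
--     if not n:
--         return set()
--     rows = len(data) // ln
--     last = x + len(n) - 1
--     cells = []
--     for cy in (y - 1, y, y + 1):            # 3x3 block around the first digit
--         for cx in (x - 1, x, x + 1):
--             cells.append((cx, cy))
--     for c in range(x + 2, last + 2):        # right edge of each further digit
--         for cy in (y - 1, y, y + 1):
--             cells.append((c, cy))
--     out = set()
--     for cx, cy in cells:
--         if 0 <= cx < ln and 0 <= cy < rows and not (cy == y and x <= cx <= last):
--             out.add(cy * ln + cx)
--     return out
-- ===== Notes on version B (the rewrite author's own statement) =====
-- stated objective: faster
-- what changed: Replaces the per-digit 8-offset expansion with a list-membership test against the number's cell list by a single frame enumeration (3x3 block plus one right-edge column per extra digit) with an O(1) arithmetic interval test, so the candidate count drops from 8*len(n) with an O(len(n)) inner scan to 3*len(n)+6 cells at O(1) each.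
-- outside the precondition, e.g. on get_neighbour_positions('0', '0', 0, 0, 0): A returns set(), B raises ZeroDivisionError
import Mathlib
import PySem

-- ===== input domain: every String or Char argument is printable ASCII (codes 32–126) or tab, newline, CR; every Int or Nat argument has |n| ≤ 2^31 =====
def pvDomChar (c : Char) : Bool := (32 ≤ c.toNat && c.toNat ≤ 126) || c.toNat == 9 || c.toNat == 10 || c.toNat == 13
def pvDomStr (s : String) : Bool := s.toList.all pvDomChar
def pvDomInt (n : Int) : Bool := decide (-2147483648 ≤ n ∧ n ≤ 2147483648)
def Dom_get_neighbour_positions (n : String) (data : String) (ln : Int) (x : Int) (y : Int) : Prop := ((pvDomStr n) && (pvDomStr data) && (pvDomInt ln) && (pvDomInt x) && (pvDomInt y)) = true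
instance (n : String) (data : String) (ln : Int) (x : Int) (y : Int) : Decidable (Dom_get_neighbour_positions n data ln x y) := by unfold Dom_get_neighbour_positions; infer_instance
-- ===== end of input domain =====

-- B replaces A's per-digit 8-offset expansion (with a list-membership test against the
-- number's cells) by a single frame enumeration with an arithmetic interval test.


-- ===== PORT A =====
def NEIGHBOUR_POINTS : List (Int × Int) :=
  [(-1, -1), (0, -1), (1, -1),
   (-1, 0),           (1, 0),
   (-1, 1),  (0, 1),  (1, 1)]

def get_neighbour_positions (n : String) (data : String) (ln : Int) (x : Int) (y : Int) : List Int :=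
  let number_positions : List (Int × Int) :=
    (PySem.List.pyRange 0 (PySem.Str.len n) 1).map (fun i => (x + i, y))
  let neighbour_positions : List Int :=
    (PySem.List.pyRange 0 (PySem.Str.len n) 1).foldl (fun acc i =>
      NEIGHBOUR_POINTS.foldl (fun acc p =>
        let new_x := x + p.1 + i
        let new_y := y + p.2
        if 0 ≤ new_x ∧ new_x < ln ∧ 0 ≤ new_y ∧
            new_y < PySem.Int.floordiv (PySem.Str.len data) ln ∧
            (new_x, new_y) ∉ number_positions
        then acc ++ [new_y * ln + new_x] else acc) acc) []
  PySem.Set.ofList neighbour_positions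

-- ===== PORT B =====
def get_neighbour_positions_alt (n : String) (data : String) (ln : Int) (x : Int) (y : Int) : List Int :=
  if PySem.Str.len n = 0 then PySem.Set.empty else
  let rows := PySem.Int.floordiv (PySem.Str.len data) ln
  let last := x + PySem.Str.len n - 1
  let cells : List (Int × Int) :=
    -- 3x3 block around the first digit
    ([y - 1, y, y + 1].foldl (fun acc cy =>
      [x - 1, x, x + 1].foldl (fun acc cx => acc ++ [(cx, cy)]) acc) [])
  let cells :=
    -- right edge of each further digit
    (PySem.List.pyRange (x + 2) (last + 2) 1).foldl (fun acc c =>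
      [y - 1, y, y + 1].foldl (fun acc cy => acc ++ [(c, cy)]) acc) cells
  cells.foldl (fun out p =>
    if 0 ≤ p.1 ∧ p.1 < ln ∧ 0 ≤ p.2 ∧ p.2 < rows ∧ ¬(p.2 = y ∧ x ≤ p.1 ∧ p.1 ≤ last)
    then PySem.Set.add out (p.2 * ln + p.1) else out) PySem.Set.empty

-- ===== PRECONDITION & SPEC =====
-- Pre_ excludes only ln = 0 with a non-empty n: there A's chained comparison short-circuits
-- before the division and A returns the empty set, while B computes rows = len(data) // ln
-- up front and naturally raises ZeroDivisionError.
def Pre_get_neighbour_positions (n : String) (data : String) (ln : Int) (x : Int) (y : Int) : Prop :=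
  PySem.Str.len n = 0 ∨ ln ≠ 0
instance (n : String) (data : String) (ln : Int) (x : Int) (y : Int) : Decidable (Pre_get_neighbour_positions n data ln x y) := by unfold Pre_get_neighbour_positions; infer_instance

def pvWitness_get_neighbour_positions : String × String × Int × Int × Int := ("12", "........", 4, 1, 0)

def Spec_get_neighbour_positions (n : String) (data : String) (ln : Int) (x : Int) (y : Int) (out : List Int) : Prop := out = get_neighbour_positions_alt n data ln x y
instance (n : String) (data : String) (ln : Int) (x : Int) (y : Int) (out : List Int) : Decidable (Spec_get_neighbour_positions n data ln x y out) := by unfold Spec_get_neighbour_positions; infer_instance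

def Claim_equal_get_neighbour_positions : Prop := ∀ (n : String) (data : String) (ln : Int) (x : Int) (y : Int), Dom_get_neighbour_positions n data ln x y → Pre_get_neighbour_positions n data ln x y → Spec_get_neighbour_positions n data ln x y (get_neighbour_positions n data ln x y)


-- ===== LEMMAS AND PROOFS =====

def pvC (ln rows x y last : Int) (p : Int × Int) : Bool :=
  decide (0 ≤ p.1 ∧ p.1 < ln ∧ 0 ≤ p.2 ∧ p.2 < rows ∧ ¬(p.2 = y ∧ x ≤ p.1 ∧ p.1 ≤ last))

def pvIdx (ln : Int) (p : Int × Int) : Int := p.2 * ln + p.1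

def pvFlt (ln rows x y last : Int) (l : List (Int × Int)) : List Int :=
  (l.filter (pvC ln rows x y last)).map (pvIdx ln)

def pvStep (x y i : Int) : List (Int × Int) :=
  [(x + -1 + i, y + -1), (x + 0 + i, y + -1), (x + 1 + i, y + -1),
   (x + -1 + i, y + 0), (x + 1 + i, y + 0),
   (x + -1 + i, y + 1), (x + 0 + i, y + 1), (x + 1 + i, y + 1)]

def pvBlock (x y : Int) : List (Int × Int) :=
  [(x - 1, y - 1), (x, y - 1), (x + 1, y - 1),
   (x - 1, y), (x, y), (x + 1, y),
   (x - 1, y + 1), (x, y + 1), (x + 1, y + 1)]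

def pvEdge (y c : Int) : List (Int × Int) := [(c, y - 1), (c, y), (c, y + 1)]

-- membership in the number_positions list is an interval test
lemma mem_number_positions (x y L a b : Int) :
    ((a, b) ∈ (PySem.List.pyRange 0 L 1).map (fun i => (x + i, y))) ↔
      (b = y ∧ x ≤ a ∧ a ≤ x + L - 1) := by
  simp [List.mem_map, PySem.List.mem_pyRange_one]
  constructor
  · rintro ⟨i, ⟨h0, h1⟩, rfl, rfl⟩; omega
  · rintro ⟨rfl, h1, h2⟩; exact ⟨a - x, by omega, by omega, rfl⟩

lemma step_eq_map (x y i : Int) :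
    NEIGHBOUR_POINTS.map (fun p => (x + p.1 + i, y + p.2)) = pvStep x y i := by
  simp [NEIGHBOUR_POINTS, pvStep]

-- A normal form
lemma A_eq (n data : String) (ln x y : Int) :
    get_neighbour_positions n data ln x y =
      PySem.Set.ofList ((PySem.List.pyRange 0 (PySem.Str.len n) 1).flatMap
        (fun i => pvFlt ln (PySem.Int.floordiv (PySem.Str.len data) ln) x y
          (x + PySem.Str.len n - 1) (pvStep x y i))) := by
  unfold get_neighbour_positions
  have hinner : ∀ (acc : List Int) (i : Int),
      NEIGHBOUR_POINTS.foldl (fun acc p =>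
        let new_x := x + p.1 + i
        let new_y := y + p.2
        if 0 ≤ new_x ∧ new_x < ln ∧ 0 ≤ new_y ∧
            new_y < PySem.Int.floordiv (PySem.Str.len data) ln ∧
            (new_x, new_y) ∉ (PySem.List.pyRange 0 (PySem.Str.len n) 1).map (fun j => (x + j, y))
        then acc ++ [new_y * ln + new_x] else acc) acc
      = acc ++ pvFlt ln (PySem.Int.floordiv (PySem.Str.len data) ln) x y
          (x + PySem.Str.len n - 1) (pvStep x y i) := by
    intro acc i
    have hfun : (fun (acc : List Int) (p : Int × Int) =>
        let new_x := x + p.1 + i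
        let new_y := y + p.2
        if 0 ≤ new_x ∧ new_x < ln ∧ 0 ≤ new_y ∧
            new_y < PySem.Int.floordiv (PySem.Str.len data) ln ∧
            (new_x, new_y) ∉ (PySem.List.pyRange 0 (PySem.Str.len n) 1).map (fun j => (x + j, y))
        then acc ++ [new_y * ln + new_x] else acc)
      = (fun (acc : List Int) (p : Int × Int) =>
          if (fun q : Int × Int => pvC ln (PySem.Int.floordiv (PySem.Str.len data) ln) x y
              (x + PySem.Str.len n - 1) (x + q.1 + i, y + q.2)) p = true
          then acc ++ [(fun q : Int × Int => (y + q.2) * ln + (x + q.1 + i)) p] else acc) := by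
      funext acc p
      simp only [pvC, decide_eq_true_eq]
      congr 1
      rw [eq_iff_iff]
      simp [mem_number_positions]
    rw [hfun, PySem.List.foldl_append_if]
    congr 1
    rw [pvFlt, ← step_eq_map, List.filter_map, List.map_map]
    rfl
  have houter : ∀ (init : List Int),
      (PySem.List.pyRange 0 (PySem.Str.len n) 1).foldl (fun acc i =>
        NEIGHBOUR_POINTS.foldl (fun acc p =>
          let new_x := x + p.1 + i
          let new_y := y + p.2
          if 0 ≤ new_x ∧ new_x < ln ∧ 0 ≤ new_y ∧
              new_y < PySem.Int.floordiv (PySem.Str.len data) ln ∧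
              (new_x, new_y) ∉ (PySem.List.pyRange 0 (PySem.Str.len n) 1).map (fun j => (x + j, y))
          then acc ++ [new_y * ln + new_x] else acc) acc) init
      = init ++ (PySem.List.pyRange 0 (PySem.Str.len n) 1).flatMap
          (fun i => pvFlt ln (PySem.Int.floordiv (PySem.Str.len data) ln) x y
            (x + PySem.Str.len n - 1) (pvStep x y i)) := by
    intro init
    rw [show (fun (acc : List Int) (i : Int) =>
        NEIGHBOUR_POINTS.foldl (fun acc p =>
          let new_x := x + p.1 + i
          let new_y := y + p.2
          if 0 ≤ new_x ∧ new_x < ln ∧ 0 ≤ new_y ∧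
              new_y < PySem.Int.floordiv (PySem.Str.len data) ln ∧
              (new_x, new_y) ∉ (PySem.List.pyRange 0 (PySem.Str.len n) 1).map (fun j => (x + j, y))
          then acc ++ [new_y * ln + new_x] else acc) acc)
      = (fun (acc : List Int) (i : Int) => acc ++ pvFlt ln
          (PySem.Int.floordiv (PySem.Str.len data) ln) x y
          (x + PySem.Str.len n - 1) (pvStep x y i)) from funext fun a => funext fun i => hinner a i]
    exact PySem.List.foldl_append_eq_flatMap _ _ _
  exact congrArg PySem.Set.ofList (by simpa using houter [])


def pvCellsE (x y : Int) (e : Nat) : List (Int × Int) :=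
  pvBlock x y ++ (List.range e).flatMap (fun (k : Nat) => pvEdge y (x + 2 + (k : Int)))

lemma cells_succ (x y : Int) (e : Nat) :
    pvCellsE x y (e + 1) = pvCellsE x y e ++ pvEdge y (x + 2 + (e : Int)) := by
  simp [pvCellsE, List.range_succ]

lemma cells_ub (x y : Int) (e : Nat) (p : Int × Int) (hp : p ∈ pvCellsE x y e) :
    p.1 ≤ x + 1 + e := by
  rcases p with ⟨a, b⟩
  simp only [pvCellsE, pvBlock, pvEdge, List.mem_append, List.mem_cons, List.mem_flatMap,
    List.mem_range, List.not_mem_nil, or_false, Prod.mk.injEq] at hp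
  rcases hp with (⟨h1,h2⟩|⟨h1,h2⟩|⟨h1,h2⟩|⟨h1,h2⟩|⟨h1,h2⟩|⟨h1,h2⟩|⟨h1,h2⟩|⟨h1,h2⟩|⟨h1,h2⟩) |
    ⟨k, hk, (⟨h1,h2⟩|⟨h1,h2⟩|⟨h1,h2⟩)⟩ <;> simp_all <;> omega

lemma cells_mem (x y : Int) (e : Nat) (cx cy : Int)
    (hy : cy = y - 1 ∨ cy = y ∨ cy = y + 1) (h1 : x - 1 ≤ cx) (h2 : cx ≤ x + 1 + e) :
    (cx, cy) ∈ pvCellsE x y e := by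
  induction e with
  | zero =>
    have hx : cx = x - 1 ∨ cx = x ∨ cx = x + 1 := by omega
    simp [pvCellsE, pvBlock, Prod.ext_iff]
    tauto
  | succ e ih =>
    rw [cells_succ]
    rcases (by omega : cx ≤ x + 1 + (e : Int) ∨ cx = x + 2 + (e : Int)) with h | h
    · exact List.mem_append_left _ (ih h)
    · subst h
      refine List.mem_append_right _ ?_
      simp [pvEdge, Prod.ext_iff]
      tauto

lemma idx_ne (ln : Int) {a b a' b' : Int} (h1 : 0 ≤ a) (h2 : a < ln) (h3 : 0 ≤ a') (h4 : a' < ln)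
    (hne : a ≠ a' ∨ b ≠ b') : b * ln + a ≠ b' * ln + a' := by
  intro h
  have hb : b = b' := by
    rcases lt_trichotomy b b' with hl | he | hl
    · have h5 : (b + 1) * ln ≤ b' * ln :=
        mul_le_mul_of_nonneg_right (by omega) (by omega)
      nlinarith
    · exact he
    · have h5 : (b' + 1) * ln ≤ b * ln :=
        mul_le_mul_of_nonneg_right (by omega) (by omega)
      nlinarith
  subst hb
  have ha : a = a' := by linarith
  tauto

lemma mem_pvFlt (ln rows x y last : Int) (l : List (Int × Int)) (a : Int) :
    a ∈ pvFlt ln rows x y last l ↔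
      ∃ p ∈ l, pvC ln rows x y last p = true ∧ pvIdx ln p = a := by
  simp [pvFlt, List.mem_map]
  tauto

lemma pvFlt_nil (ln rows x y last : Int) : pvFlt ln rows x y last [] = [] := rfl

lemma pvFlt_cons (ln rows x y last : Int) (p : Int × Int) (l : List (Int × Int)) :
    pvFlt ln rows x y last (p :: l) =
      (if pvC ln rows x y last p = true then [pvIdx ln p] else []) ++ pvFlt ln rows x y last l := by
  by_cases h : pvC ln rows x y last p = true <;> simp [pvFlt, h]

lemma pvFlt_append (ln rows x y last : Int) (u v : List (Int × Int)) :
    pvFlt ln rows x y last (u ++ v) = pvFlt ln rows x y last u ++ pvFlt ln rows x y last v := by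
  simp [pvFlt]

lemma fold_skip (s r : List Int) (c : Bool) (v : Int) (h : c = true → v ∈ s) :
    List.foldl PySem.Set.add s ((if c = true then [v] else []) ++ r) =
      List.foldl PySem.Set.add s r := by
  cases c with
  | false => simp
  | true => simp [PySem.Set.add_of_mem (h rfl)]

lemma fold_push (s r : List Int) (c : Bool) (v : Int) (h : c = true → v ∉ s) :
    List.foldl PySem.Set.add s ((if c = true then [v] else []) ++ r) =
      List.foldl PySem.Set.add (s ++ if c = true then [v] else []) r := by
  cases c with
  | false => simp
  | true => simp [PySem.Set.add_of_not_mem (h rfl)]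

lemma nodup_pvFlt (ln rows x y last : Int) (l : List (Int × Int)) (hl : l.Nodup) :
    (pvFlt ln rows x y last l).Nodup := by
  refine List.Nodup.map_on ?_ (hl.filter _)
  intro p hp q hq hpq
  rw [List.mem_filter] at hp hq
  by_contra hne
  have h1 := hp.2; have h2 := hq.2
  simp only [pvC, decide_eq_true_eq] at h1 h2
  have hor : p.1 ≠ q.1 ∨ p.2 ≠ q.2 := by
    rcases p with ⟨p1, p2⟩; rcases q with ⟨q1, q2⟩
    simp only [Prod.mk.injEq] at hne ⊢
    tauto
  exact idx_ne ln h1.1 h1.2.1 h2.1 h2.2.1 hor (by simpa [pvIdx] using hpq)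

lemma fold_g_to_add (ln rows x y last : Int) (l : List (Int × Int)) (s : List Int) :
    l.foldl (fun out p =>
      if 0 ≤ p.1 ∧ p.1 < ln ∧ 0 ≤ p.2 ∧ p.2 < rows ∧ ¬(p.2 = y ∧ x ≤ p.1 ∧ p.1 ≤ last)
      then PySem.Set.add out (p.2 * ln + p.1) else out) s
    = List.foldl PySem.Set.add s (pvFlt ln rows x y last l) := by
  induction l generalizing s with
  | nil => simp [pvFlt]
  | cons p l ih =>
    rw [pvFlt_cons]
    by_cases h : pvC ln rows x y last p = true
    · have h' : 0 ≤ p.1 ∧ p.1 < ln ∧ 0 ≤ p.2 ∧ p.2 < rows ∧ ¬(p.2 = y ∧ x ≤ p.1 ∧ p.1 ≤ last) := by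
        exact of_decide_eq_true h
      simp only [List.foldl, if_pos h', if_pos h, List.singleton_append]
      exact ih _
    · have h' : ¬(0 ≤ p.1 ∧ p.1 < ln ∧ 0 ≤ p.2 ∧ p.2 < rows ∧ ¬(p.2 = y ∧ x ≤ p.1 ∧ p.1 ≤ last)) := by
        exact fun hc => h (decide_eq_true hc)
      simp only [List.foldl, if_neg h', if_neg h, List.nil_append]
      exact ih _

-- B normal form
lemma B_eq (n data : String) (ln x y : Int) (h : ¬ PySem.Str.len n = 0) :
    get_neighbour_positions_alt n data ln x y =
      List.foldl PySem.Set.add []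
        (pvFlt ln (PySem.Int.floordiv (PySem.Str.len data) ln) x y (x + PySem.Str.len n - 1)
          (pvCellsE x y ((PySem.Str.len n).toNat - 1))) := by
  unfold get_neighbour_positions_alt
  rw [if_neg h]
  have hblock : ([y - 1, y, y + 1].foldl (fun acc cy =>
      [x - 1, x, x + 1].foldl (fun acc cx => acc ++ [(cx, cy)]) acc) ([] : List (Int × Int)))
      = pvBlock x y := by
    simp [List.foldl, pvBlock]
  have hcells : ((PySem.List.pyRange (x + 2) (x + PySem.Str.len n - 1 + 2) 1).foldl
      (fun acc c => [y - 1, y, y + 1].foldl (fun acc cy => acc ++ [(c, cy)]) acc)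
      (pvBlock x y))
      = pvCellsE x y ((PySem.Str.len n).toNat - 1) := by
    have h1 : (fun (acc : List (Int × Int)) (c : Int) =>
        [y - 1, y, y + 1].foldl (fun acc cy => acc ++ [(c, cy)]) acc)
        = fun acc c => acc ++ pvEdge y c := by
      funext acc c
      simp [List.foldl, pvEdge]
    rw [h1, PySem.List.foldl_append_eq_flatMap]
    have h2 : PySem.List.pyRange (x + 2) (x + PySem.Str.len n - 1 + 2) 1
        = (List.range ((PySem.Str.len n).toNat - 1)).map (fun (k : Nat) => x + 2 + (k : Int)) := by
      rw [PySem.List.pyRange_one]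
      have h3 : (x + PySem.Str.len n - 1 + 2 - (x + 2)).toNat = (PySem.Str.len n).toNat - 1 := by
        omega
      rw [h3]
    rw [h2, List.flatMap_map]
    rfl
  simp only []
  rw [hblock, hcells]
  exact fold_g_to_add _ _ _ _ _ _ _

lemma ofList_append_foldl {u v : List Int} :
    PySem.Set.ofList (u ++ v) = List.foldl PySem.Set.add (PySem.Set.ofList u) v := by
  rw [PySem.Set.ofList_eq_foldl, PySem.Set.ofList_eq_foldl, List.foldl_append]

lemma foldl_add_nodup (l : List Int) : ∀ (s : List Int),
    (∀ a ∈ l, a ∉ s) → l.Nodup → List.foldl PySem.Set.add s l = s ++ l := by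
  induction l with
  | nil => simp
  | cons a l ih =>
    intro s hs hn
    simp only [List.foldl]
    rw [PySem.Set.add_of_not_mem (hs a (List.mem_cons_self))]
    rw [ih (s ++ [a]) ?_ (List.nodup_cons.mp hn).2]
    · simp
    · intro b hb
      simp only [List.mem_append, List.mem_singleton]
      rintro (h | rfl)
      · exact hs b (List.mem_cons_of_mem _ hb) h
      · exact (List.nodup_cons.mp hn).1 hb

lemma ofList_self {l : List Int} (h : l.Nodup) : PySem.Set.ofList l = l := by
  rw [PySem.Set.ofList_eq_foldl]
  simpa using foldl_add_nodup l [] (by simp) h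

def pvSeg (ln rows x y last c r : Int) : List Int :=
  if pvC ln rows x y last (c, r) = true then [pvIdx ln (c, r)] else []

lemma pvFlt_pair_cons (ln rows x y last c r : Int) (l : List (Int × Int)) :
    pvFlt ln rows x y last ((c, r) :: l) = pvSeg ln rows x y last c r ++ pvFlt ln rows x y last l :=
  pvFlt_cons ln rows x y last (c, r) l

lemma mem_pvSeg (ln rows x y last c r a : Int) :
    a ∈ pvSeg ln rows x y last c r ↔ pvC ln rows x y last (c, r) = true ∧ a = pvIdx ln (c, r) := by
  unfold pvSeg
  by_cases h : pvC ln rows x y last (c, r) = true <;> simp [h]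

lemma seg_skip {ln rows x y last c r : Int} {s rest : List Int}
    (h : pvC ln rows x y last (c, r) = true → pvIdx ln (c, r) ∈ s) :
    List.foldl PySem.Set.add s (pvSeg ln rows x y last c r ++ rest) =
      List.foldl PySem.Set.add s rest := by
  unfold pvSeg
  exact fold_skip s rest _ _ h

lemma seg_push {ln rows x y last c r : Int} {s rest : List Int}
    (h : pvC ln rows x y last (c, r) = true → pvIdx ln (c, r) ∉ s) :
    List.foldl PySem.Set.add s (pvSeg ln rows x y last c r ++ rest) =
      List.foldl PySem.Set.add (s ++ pvSeg ln rows x y last c r) rest := by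
  unfold pvSeg
  exact fold_push s rest _ _ h

lemma pvC_bounds {ln rows x y last c r : Int} (h : pvC ln rows x y last (c, r) = true) :
    0 ≤ c ∧ c < ln := by
  rw [pvC, decide_eq_true_eq] at h
  exact ⟨h.1, h.2.1⟩

lemma fold_step (ln rows x y last c0 c1 c2 : Int) (s : List Int)
    (hmem : ∀ cx cy, (cx = c0 ∨ cx = c1) → (cy = y - 1 ∨ cy = y ∨ cy = y + 1) →
      pvC ln rows x y last (cx, cy) = true → pvIdx ln (cx, cy) ∈ s)
    (hub : ∀ a ∈ s, ∃ p : Int × Int, 0 ≤ p.1 ∧ p.1 < ln ∧ p.1 < c2 ∧ a = pvIdx ln p)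
    (hc4 : pvC ln rows x y last (c0, y) = false) :
    List.foldl PySem.Set.add s (pvFlt ln rows x y last
      [(c0, y - 1), (c1, y - 1), (c2, y - 1), (c0, y), (c2, y), (c0, y + 1), (c1, y + 1), (c2, y + 1)])
    = s ++ pvFlt ln rows x y last [(c2, y - 1), (c2, y), (c2, y + 1)] := by
  have hfresh : ∀ (r : Int), pvC ln rows x y last (c2, r) = true → pvIdx ln (c2, r) ∉ s := by
    intro r hc hm
    obtain ⟨p, hp1, hp2, hp3, hp4⟩ := hub _ hm
    have hb := pvC_bounds hc
    exact idx_ne ln hp1 hp2 hb.1 hb.2 (Or.inl (by omega)) (by simpa [pvIdx] using hp4.symm)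
  have hfresh2 : ∀ (r r' : Int), r ≠ r' → pvC ln rows x y last (c2, r) = true →
      pvIdx ln (c2, r) ∉ pvSeg ln rows x y last c2 r' := by
    intro r r' hrr hc hm
    rw [mem_pvSeg] at hm
    have hb := pvC_bounds hc
    exact idx_ne ln hb.1 hb.2 hb.1 hb.2 (Or.inr hrr) (by simpa [pvIdx] using hm.2)
  have hseg4 : pvSeg ln rows x y last c0 y = [] := by
    simp [pvSeg, hc4]
  simp only [pvFlt_pair_cons, pvFlt_nil, hseg4, List.nil_append]
  rw [seg_skip (fun hc => hmem _ _ (Or.inl rfl) (Or.inl rfl) hc)]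
  rw [seg_skip (fun hc => hmem _ _ (Or.inr rfl) (Or.inl rfl) hc)]
  rw [seg_push (hfresh _)]
  rw [seg_push (fun hc => by
    intro hm
    rcases List.mem_append.mp hm with hm | hm
    · exact hfresh _ hc hm
    · exact hfresh2 _ _ (by omega) hc hm)]
  rw [seg_skip (fun hc => List.mem_append_left _ (List.mem_append_left _
    (hmem _ _ (Or.inl rfl) (Or.inr (Or.inr rfl)) hc)))]
  rw [seg_skip (fun hc => List.mem_append_left _ (List.mem_append_left _
    (hmem _ _ (Or.inr rfl) (Or.inr (Or.inr rfl)) hc)))]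
  rw [seg_push (fun hc => by
    intro hm
    rcases List.mem_append.mp hm with hm | hm
    · rcases List.mem_append.mp hm with hm | hm
      · exact hfresh _ hc hm
      · exact hfresh2 _ _ (by omega) hc hm
    · exact hfresh2 _ _ (by omega) hc hm)]
  simp [List.append_assoc]

lemma edge_nodup (y c : Int) : (pvEdge y c).Nodup := by
  simp [pvEdge, Prod.ext_iff]
  omega

lemma cells_nodup (x y : Int) (e : Nat) : (pvCellsE x y e).Nodup := by
  induction e with
  | zero =>
    simp [pvCellsE, pvBlock, Prod.ext_iff]
    omega
  | succ e ih =>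
    rw [cells_succ]
    refine List.Nodup.append ih (edge_nodup _ _) ?_
    intro p hp hq
    have h1 := cells_ub x y e p hp
    rcases p with ⟨a, b⟩
    simp [pvEdge, Prod.ext_iff] at hq
    omega

lemma main_ind (ln rows x y last : Int) (L : Nat) (hL : 1 ≤ L) (hlast : last = x + L - 1) :
    ∀ e : Nat, e + 1 ≤ L →
      PySem.Set.ofList ((List.range (e + 1)).flatMap
          (fun (k : Nat) => pvFlt ln rows x y last (pvStep x y (k : Int))))
        = pvFlt ln rows x y last (pvCellsE x y e) := by
  intro e
  induction e with
  | zero =>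
    intro _
    have hstep0 : pvStep x y ((0 : Nat) : Int) =
        [(x - 1, y - 1), (x, y - 1), (x + 1, y - 1), (x - 1, y), (x + 1, y),
         (x - 1, y + 1), (x, y + 1), (x + 1, y + 1)] := by
      simp [pvStep, Prod.ext_iff]
      omega
    have hcell0 : pvCellsE x y 0 = pvBlock x y := by simp [pvCellsE]
    have hcenter : pvC ln rows x y last (x, y) = false :=
      decide_eq_false (fun hc => hc.2.2.2.2 ⟨rfl, le_refl x, by omega⟩)
    have hflt : pvFlt ln rows x y last (pvCellsE x y 0) =
        pvFlt ln rows x y last (pvStep x y ((0 : Nat) : Int)) := by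
      rw [hcell0, hstep0]
      simp only [pvBlock, pvFlt_cons, pvFlt_nil, hcenter]
      simp
    rw [List.range_one]
    simp only [List.flatMap_cons, List.flatMap_nil, List.append_nil]
    rw [hflt]
    refine ofList_self (nodup_pvFlt _ _ _ _ _ _ ?_)
    rw [hstep0]
    simp [Prod.ext_iff]
    omega
  | succ e ih =>
    intro he1
    rw [List.range_succ]
    simp only [List.flatMap_append, List.flatMap_cons, List.flatMap_nil, List.append_nil]
    rw [ofList_append_foldl, ih (by omega)]
    have hstep : pvStep x y ((e + 1 : Nat) : Int) =
        [(x + e, y - 1), (x + 1 + e, y - 1), (x + 2 + e, y - 1), (x + e, y),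
         (x + 2 + e, y), (x + e, y + 1), (x + 1 + e, y + 1), (x + 2 + e, y + 1)] := by
      simp [pvStep, Prod.ext_iff]
      omega
    rw [hstep, cells_succ, pvFlt_append]
    have hedge : pvEdge y (x + 2 + (e : Int)) = [(x + 2 + (e : Int), y - 1),
        (x + 2 + (e : Int), y), (x + 2 + (e : Int), y + 1)] := rfl
    rw [hedge]
    refine fold_step ln rows x y last (x + e) (x + 1 + e) (x + 2 + e) _ ?_ ?_ ?_
    · intro cx cy hcx hcy hc
      rw [mem_pvFlt]
      refine ⟨(cx, cy), cells_mem x y e cx cy hcy (by omega) (by omega), hc, rfl⟩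
    · intro a ha
      rw [mem_pvFlt] at ha
      obtain ⟨p, hp, hcp, hip⟩ := ha
      have hub := cells_ub x y e p hp
      have hb := by
        rw [pvC, decide_eq_true_eq] at hcp
        exact hcp
      exact ⟨p, hb.1, hb.2.1, by omega, hip.symm⟩
    · exact decide_eq_false (fun hc => hc.2.2.2.2 ⟨rfl, by omega, by omega⟩)


-- ===== VERDICT (by name: the statement is the Claim_ definition above) =====
theorem get_neighbour_positions_spec : Claim_equal_get_neighbour_positions := by
  unfold Claim_equal_get_neighbour_positions
  intro n data ln x y hDom hPre
  unfold Spec_get_neighbour_positions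
  by_cases h0 : PySem.Str.len n = 0
  · rw [A_eq]
    unfold get_neighbour_positions_alt
    rw [if_pos h0, h0]
    simp
  · have hlen := PySem.Str.len_eq n
    set L := (PySem.Str.len n).toNat with hLdef
    have hcast : PySem.Str.len n = (L : Int) := by omega
    have hL1 : 1 ≤ L := by omega
    rw [A_eq, B_eq n data ln x y h0, hcast]
    have hrange : PySem.List.pyRange 0 (L : Int) 1 = (List.range L).map (fun (k : Nat) => (k : Int)) := by
      rw [PySem.List.pyRange_one]
      simp
    rw [hrange, List.flatMap_map]
    have hmain := main_ind ln (PySem.Int.floordiv (PySem.Str.len data) ln) x y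
      (x + (L : Int) - 1) L hL1 rfl (L - 1) (by omega)
    rw [Nat.sub_add_cancel hL1] at hmain
    calc PySem.Set.ofList ((List.range L).flatMap
            ((fun (i : Int) => pvFlt ln (PySem.Int.floordiv (PySem.Str.len data) ln) x y
              (x + (L : Int) - 1) (pvStep x y i)) ∘ (fun (k : Nat) => (k : Int))))
        = pvFlt ln (PySem.Int.floordiv (PySem.Str.len data) ln) x y (x + (L : Int) - 1)
            (pvCellsE x y (L - 1)) := hmain
      _ = PySem.Set.ofList (pvFlt ln (PySem.Int.floordiv (PySem.Str.len data) ln) x y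
            (x + (L : Int) - 1) (pvCellsE x y (L - 1))) :=
          (ofList_self (nodup_pvFlt _ _ _ _ _ _ (cells_nodup x y (L - 1)))).symm
      _ = List.foldl PySem.Set.add [] (pvFlt ln (PySem.Int.floordiv (PySem.Str.len data) ln) x y
            (x + (L : Int) - 1) (pvCellsE x y (L - 1))) := PySem.Set.ofList_eq_foldl _
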